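-- pv_equiv track=rewrite | github.com/chldbwls/python_study | 프로그래머스/1/135808. 과일 장수/과일 장수.py | solution
-- ===== SOURCE A (Python) =====
-- def solution(k, m, score):
--     score.sort()
--     start=len(score)%m
--     arr=score[start::m]
--     sum=0
--     for i in range(len(arr)):
--         sum+=arr[i]*m
--     return sum
-- ===== SOURCE B (Python) =====
-- def solution(k, m, score):
--     # Frequency-count the scores, walk the DISTINCT values in descending order,
--     # and count with floor-division arithmetic how many box minima fall inside
--     # each value's run: positions c..c2-1 contain c2//m - c//m box-end indices.
--     counts = {}
--     for v in score:
--         counts[v] = counts.get(v, 0) + 1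
--     total = 0
--     c = 0
--     for v in sorted(counts, reverse=True):
--         c2 = c + counts[v]
--         total += v * (c2 // m - c // m)
--         c = c2
--     return total * m
-- ===== Notes on version B (the rewrite author's own statement) =====
-- stated objective: alternative
-- what changed: B replaces A's sort-then-stride-slice over individual elements by a frequency counter: it sorts only the distinct values descending and computes per value-run, via floor-division arithmetic on cumulative counts, how many box minima that run contributes.
-- outside the precondition, e.g. on solution(4, -2, [1, 2, 3]): A returns -8, B returns 8
import Mathlib
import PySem

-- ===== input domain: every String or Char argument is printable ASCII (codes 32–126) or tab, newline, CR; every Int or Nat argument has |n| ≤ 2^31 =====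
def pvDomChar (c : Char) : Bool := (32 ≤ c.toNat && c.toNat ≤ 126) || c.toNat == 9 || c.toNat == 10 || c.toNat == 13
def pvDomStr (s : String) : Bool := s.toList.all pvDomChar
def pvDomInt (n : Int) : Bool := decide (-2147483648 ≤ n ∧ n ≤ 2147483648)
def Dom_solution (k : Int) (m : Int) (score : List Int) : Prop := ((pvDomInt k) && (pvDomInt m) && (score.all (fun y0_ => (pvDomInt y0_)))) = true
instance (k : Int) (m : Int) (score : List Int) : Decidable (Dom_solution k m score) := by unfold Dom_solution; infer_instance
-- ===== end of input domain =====

-- B counts score frequencies and walks only the distinct values descending, computing with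
-- floor-division arithmetic on cumulative counts how many box minima each value contributes,
-- instead of A's full sort + len%m offset + step-m slice + per-element loop; same result.
-- Note: Python A sorts `score` in place (caller-visible mutation); B does not. The claim is about the return value.

-- ===== PORT A =====
def solution (k : Int) (m : Int) (score : List Int) : Int :=
  -- score.sort()
  let s := PySem.List.sorted score (fun x => x) false
  -- start = len(score) % m  (ZeroDivisionError when m = 0 → excluded by Pre_)
  match PySem.Int.mod? (s.length : Int) m with
  | none => 0
  | some start =>
    -- arr = score[start::m]
    match PySem.List.slice? s (some start) none m with
    | none => 0
    | some arr =>
      -- for i in range(len(arr)): sum += arr[i]*m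
      (PySem.List.pyRange 0 (arr.length : Int) 1).foldl
        (fun acc i => acc + (PySem.List.pyGetD arr i 0) * m) 0

-- ===== PORT B =====
def solution_alt (k : Int) (m : Int) (score : List Int) : Int :=
  -- counts = {}; for v in score: counts[v] = counts.get(v, 0) + 1
  let counts := score.foldl (fun d v => d.insert v (d.getD v 0 + 1)) (PySem.Dict.empty : PySem.Dict Int Int)
  -- total = 0; c = 0; for v in sorted(counts, reverse=True): ...
  let p := (PySem.List.sorted counts.keys (fun x => x) true).foldl
    (fun (p : Int × Int) v =>
      let c2 := p.2 + counts.getD v 0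
      (p.1 + v * (PySem.Int.floordiv c2 m - PySem.Int.floordiv p.2 m), c2)) ((0 : Int), (0 : Int))
  p.1 * m

-- ===== PRECONDITION & SPEC =====
-- Pre_ excludes m ≤ 0: with m = 0 both programs raise ZeroDivisionError, and a negative
-- box size m is outside the task's natural domain (A then slices backwards and returns an
-- accidental value, e.g. -8 on (4, -2, [1, 2, 3]), where B's arithmetic gives 8).
def Pre_solution (k : Int) (m : Int) (score : List Int) : Prop := 1 ≤ m
instance (k : Int) (m : Int) (score : List Int) : Decidable (Pre_solution k m score) := by unfold Pre_solution; infer_instance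
def pvWitness_solution : Int × Int × List Int := (4, 2, [1, 2, 3, 1, 2])

def Spec_solution (k : Int) (m : Int) (score : List Int) (out : Int) : Prop := out = solution_alt k m score
instance (k : Int) (m : Int) (score : List Int) (out : Int) : Decidable (Spec_solution k m score out) := by unfold Spec_solution; infer_instance

-- ===== CLAIM (what is proved, stated in full; the proofs are below) =====
def Claim_equal_solution : Prop := ∀ (k : Int) (m : Int) (score : List Int), Dom_solution k m score → Pre_solution k m score → Spec_solution k m score (solution k m score)

-- ===== LEMMAS AND PROOFS =====

-- ---- A side: A = (sum of the descending sort at indices m-1, 2m-1, …) * m ----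

lemma pv_slice_stride (s : List Int) (mN : Nat) (hm : 1 ≤ mN) :
    PySem.List.slice? s (some ((s.length % mN : Nat) : Int)) none ((mN : Nat) : Int)
      = some ((List.range (s.length / mN)).map (fun j => s.getD (s.length % mN + mN * j) 0)) := by
  have h0 : (0:Int) < ((mN:Nat):Int) := by omega
  obtain ⟨q, r, hq, hr, hprod, hrlt⟩ :
      ∃ q r, s.length / mN = q ∧ s.length % mN = r ∧ mN * q + r = s.length ∧ r < mN :=
    ⟨_, _, rfl, rfl, Nat.div_add_mod s.length mN, Nat.mod_lt _ (by omega)⟩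
  rw [hq, hr]
  unfold PySem.List.slice? PySem.List.sliceIndices
  simp only [if_neg h0.ne', if_neg (not_lt.mpr h0.le), if_pos h0,
    if_neg (by omega : ¬ ((r : Nat) : Int) < 0)]
  rw [min_eq_left (by omega : ((r : Nat) : Int) ≤ (s.length : Int))]
  have hcount :
      (if ((r : Nat) : Int) < (s.length : Int) then
        (((s.length : Int) - ((r : Nat) : Int) + ((mN : Nat) : Int) - 1) / ((mN : Nat) : Int)).toNat
      else 0) = q := by
    by_cases h : ((r : Nat) : Int) < (s.length : Int)
    · rw [if_pos h]
      have h1 : (s.length : Int) - ((r : Nat) : Int) + ((mN : Nat) : Int) - 1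
          = ((mN * q + (mN - 1) : Nat) : Int) := by omega
      have h2 : (mN * q + (mN - 1)) / mN = q := by
        rw [Nat.mul_add_div (by omega)]
        simp [Nat.div_eq_of_lt (show mN - 1 < mN by omega)]
      rw [h1, ← Int.natCast_ediv, Int.toNat_natCast, h2]
    · rw [if_neg h]
      have : q ≤ mN * q := Nat.le_mul_of_pos_left q (by omega)
      omega
  rw [hcount]
  congr 1
  rw [List.filterMap_congr (g := fun j => some (s.getD (r + mN * j) 0)) ?side]
  case side =>
    intro j hj
    have hjq : j < q := List.mem_range.mp hj
    have hmul : mN * (j + 1) ≤ mN * q := Nat.mul_le_mul_left mN (by omega)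
    have e : mN * (j + 1) = mN * j + mN := by ring
    have hidx : r + mN * j < s.length := by omega
    have hcast : (((r : Nat) : Int) + ((mN : Nat) : Int) * (j : Int)).toNat = r + mN * j := by
      omega
    rw [hcast, List.getElem?_eq_getElem hidx]
    simp [List.getElem?_eq_getElem hidx]
  exact congrFun List.filterMap_eq_map _

-- sorted(xs, reverse=True) on plain Ints is the reverse of sorted(xs)
lemma pv_sorted_desc_eq_reverse (xs : List Int) :
    PySem.List.sorted xs (fun x => x) true = (PySem.List.sorted xs (fun x => x) false).reverse := by
  apply PySem.List.eq_of_perm_of_pairwise_le_of_injective (fun x : Int => -x) neg_injective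
  · exact (PySem.List.sorted_perm xs _ true).trans
      ((List.reverse_perm _).trans (PySem.List.sorted_perm xs _ false)).symm
  · exact (PySem.List.sorted_pairwise_rev xs (fun x : Int => x)).imp (fun h => by simpa using h)
  · exact List.pairwise_reverse.mpr
      ((PySem.List.sorted_pairwise xs (fun x : Int => x)).imp (fun h => by simpa using h))

-- A's ascending stride walk picks the same elements as the descending walk m-1, 2m-1, …
lemma pv_sel_sum (s : List Int) (mN : Nat) (hm : 1 ≤ mN) :
    ((List.range (s.length / mN)).map (fun j => s.getD (s.length % mN + mN * j) 0)).sum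
      = ((List.range (s.length / mN)).map (fun j => s.reverse.getD (mN - 1 + mN * j) 0)).sum := by
  obtain ⟨q, r, hq, hr, hprod, hrlt⟩ :
      ∃ q r, s.length / mN = q ∧ s.length % mN = r ∧ mN * q + r = s.length ∧ r < mN :=
    ⟨_, _, rfl, rfl, Nat.div_add_mod s.length mN, Nat.mod_lt _ (by omega)⟩
  rw [hq, hr]
  have key : ∀ j, j < q →
      s.reverse.getD (mN - 1 + mN * (q - 1 - j)) 0 = s.getD (r + mN * j) 0 := by
    intro j hj
    have hsum : mN * q = mN * (q - 1 - j) + mN * j + mN := by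
      have h2 : (q - 1 - j) + j + 1 = q := by omega
      calc mN * q = mN * ((q - 1 - j) + j + 1) := by rw [h2]
      _ = mN * (q - 1 - j) + mN * j + mN := by ring
    have h1 : mN - 1 + mN * (q - 1 - j) < s.length := by omega
    have h1' : mN - 1 + mN * (q - 1 - j) < s.reverse.length := by
      rw [List.length_reverse]; exact h1
    have h2 : r + mN * j < s.length := by omega
    rw [List.getD_eq_getElem _ _ h1', List.getD_eq_getElem _ _ h2, List.getElem_reverse]
    congr 1
    omega
  have e1 : ((List.range q).map (fun j => s.getD (r + mN * j) 0)).sum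
      = ∑ j ∈ Finset.range q, s.getD (r + mN * j) 0 := rfl
  have e2 : ((List.range q).map (fun j => s.reverse.getD (mN - 1 + mN * j) 0)).sum
      = ∑ j ∈ Finset.range q, s.reverse.getD (mN - 1 + mN * j) 0 := rfl
  rw [e1, e2, ← Finset.sum_range_reflect (fun j => s.reverse.getD (mN - 1 + mN * j) 0)]
  exact Finset.sum_congr rfl (fun j hj => (key j (Finset.mem_range.mp hj)).symm)

lemma pv_A_eq (k : Int) (mN : Nat) (hm : 1 ≤ mN) (score : List Int) :
    solution k ((mN : Nat) : Int) score
      = (∑ j ∈ Finset.range (score.length / mN),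
          (PySem.List.sorted score (fun x => x) true).getD (mN - 1 + mN * j) 0) * ((mN : Nat) : Int) := by
  simp only [solution]
  set s := PySem.List.sorted score (fun x => x) false with hs
  have hlen : s.length = score.length := by rw [hs]; simp
  have hmod? : PySem.Int.mod? (s.length : Int) ((mN : Nat) : Int)
      = some ((s.length % mN : Nat) : Int) := by
    simp only [PySem.Int.mod?, if_neg (by omega : ¬ ((mN : Nat) : Int) = 0)]
    simpa [PySem.Int.mod] using PySem.Int.mod_natCast s.length mN
  simp only [hmod?]
  simp only [pv_slice_stride s mN hm]
  set arrA := (List.range (s.length / mN)).map (fun j => s.getD (s.length % mN + mN * j) 0) with harr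
  rw [PySem.List.foldl_pyRange_zero_pyGetD' arrA 0 (fun acc x => acc + x * ((mN : Nat) : Int)) 0]
  rw [PySem.List.foldl_add arrA (fun x => x * ((mN : Nat) : Int)) 0]
  rw [List.sum_map_mul_right, List.map_id', harr, pv_sel_sum s mN hm]
  rw [pv_sorted_desc_eq_reverse score, ← hs, hlen]
  rw [zero_add]
  rfl

-- ---- B side helpers ----

-- counting the elements of the flattened run list
lemma pv_count_flat (cnt : Int → Nat) (vals : List Int) (h : vals.Nodup) (x : Int) :
    (vals.flatMap (fun v => List.replicate (cnt v) v)).count x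
      = if x ∈ vals then cnt x else 0 := by
  induction vals with
  | nil => simp
  | cons v t ih =>
    have hv : v ∉ t := (List.nodup_cons.mp h).1
    have ht : t.Nodup := (List.nodup_cons.mp h).2
    rw [List.flatMap_cons, List.count_append, ih ht]
    by_cases hxv : x = v
    · subst hxv
      simp [List.count_replicate, hv]
    · simp [List.count_replicate, hxv, Ne.symm hxv, List.mem_cons]

-- the descending sort is the concatenation of the constant runs of its distinct values
lemma pv_runs (score : List Int) :
    PySem.List.sorted score (fun x => x) true
      = (PySem.List.sorted (PySem.Set.ofList score) (fun x => x) true).flatMap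
          (fun v => List.replicate (score.count v) v) := by
  set vals := PySem.List.sorted (PySem.Set.ofList score) (fun x => x) true with hvals
  have hperm_vals : vals.Perm (PySem.Set.ofList score) := PySem.List.sorted_perm _ _ _
  have hnodup : vals.Nodup := hperm_vals.nodup_iff.mpr (PySem.Set.nodup_ofList score)
  have hmem : ∀ x : Int, x ∈ vals ↔ x ∈ score := by
    intro x
    rw [hperm_vals.mem_iff, PySem.Set.mem_ofList]
  apply PySem.List.eq_of_perm_of_pairwise_le_of_injective (fun x : Int => -x) neg_injective
  · -- permutation via equal counts
    refine (PySem.List.sorted_perm score (fun x => x) true).trans (List.perm_iff_count.mpr ?_)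
    intro x
    rw [pv_count_flat (fun v => score.count v) vals hnodup x]
    by_cases hx : x ∈ score
    · simp [(hmem x).mpr hx]
    · simp [hx, fun h => hx ((hmem x).mp h), List.count_eq_zero.mpr hx]
  · exact (PySem.List.sorted_pairwise_rev score (fun x : Int => x)).imp (fun h => by simpa using h)
  · -- the flattened run list is descending
    have hpw : vals.Pairwise (fun a b : Int => b ≤ a) :=
      (PySem.List.sorted_pairwise_rev _ (fun x : Int => x)).imp (fun h => by simpa using h)
    rw [List.flatMap]
    rw [List.pairwise_flatten]
    constructor
    · intro l hl
      rw [List.mem_map] at hl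
      obtain ⟨v, _, rfl⟩ := hl
      exact List.pairwise_replicate.mpr (Or.inr (le_refl (-v)))
    · rw [List.pairwise_map]
      refine hpw.imp_of_mem ?_
      intro a b _ _ hab
      intro x hx y hy
      rw [List.eq_of_mem_replicate hx, List.eq_of_mem_replicate hy]
      simpa using hab

-- one constant run, element by element, telescopes
lemma pv_rep_fold (mI v : Int) (n : Nat) : ∀ T c : Int,
    (List.replicate n v).foldl
        (fun (p : Int × Int) x =>
          (p.1 + x * (PySem.Int.floordiv (p.2 + 1) mI - PySem.Int.floordiv p.2 mI), p.2 + 1))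
        (T, c)
      = (T + v * (PySem.Int.floordiv (c + (n : Int)) mI - PySem.Int.floordiv c mI), c + (n : Int)) := by
  induction n with
  | zero => intro T c; simp
  | succ n ih =>
    intro T c
    rw [List.replicate_succ, List.foldl_cons, ih]
    dsimp only
    simp only [Prod.mk.injEq]
    push_cast
    have e : c + 1 + (n : Int) = c + ((n : Int) + 1) := by ring
    rw [e]
    exact ⟨by ring, by ring⟩

-- the run-level fold of B equals the element-level fold over the flattened runs
lemma pv_fold_runs (mI : Int) (cnt : Int → Nat) (vals : List Int) : ∀ T c : Int,
    vals.foldl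
        (fun (p : Int × Int) v =>
          (p.1 + v * (PySem.Int.floordiv (p.2 + ((cnt v : Nat) : Int)) mI - PySem.Int.floordiv p.2 mI),
           p.2 + ((cnt v : Nat) : Int)))
        (T, c)
      = (vals.flatMap (fun v => List.replicate (cnt v) v)).foldl
          (fun (p : Int × Int) x =>
            (p.1 + x * (PySem.Int.floordiv (p.2 + 1) mI - PySem.Int.floordiv p.2 mI), p.2 + 1))
          (T, c) := by
  induction vals with
  | nil => intro T c; simp
  | cons v t ih =>
    intro T c
    rw [List.flatMap_cons, List.foldl_append, pv_rep_fold mI v (cnt v) T c, List.foldl_cons, ih]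

-- the element-level fold from position p computes an indexed weighted sum
lemma pv_fold_elt (mN : Nat) (t : List Int) : ∀ (T : Int) (p : Nat),
    t.foldl
        (fun (q : Int × Int) x =>
          (q.1 + x * (PySem.Int.floordiv (q.2 + 1) ((mN : Nat) : Int) - PySem.Int.floordiv q.2 ((mN : Nat) : Int)), q.2 + 1))
        (T, (p : Int))
      = (T + ∑ i ∈ Finset.range t.length,
            t.getD i 0 * ((((p + i + 1) / mN : Nat) : Int) - (((p + i) / mN : Nat) : Int)),
         ((p + t.length : Nat) : Int)) := by
  induction t with
  | nil => intro T p; simp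
  | cons x tl ih =>
    intro T p
    rw [List.foldl_cons]
    dsimp only
    have h1 : ((p : Nat) : Int) + 1 = (((p + 1 : Nat)) : Int) := by push_cast; ring
    rw [h1, PySem.Int.floordiv_natCast, PySem.Int.floordiv_natCast, ih]
    simp only [Prod.mk.injEq]
    constructor
    · rw [show (∑ i ∈ Finset.range tl.length,
            tl.getD i 0 * ((((p + 1 + i + 1) / mN : Nat) : Int) - (((p + 1 + i) / mN : Nat) : Int)))
          = ∑ i ∈ Finset.range tl.length,
            tl.getD i 0 * ((((p + (i + 1) + 1) / mN : Nat) : Int) - (((p + (i + 1)) / mN : Nat) : Int))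
        from Finset.sum_congr rfl (fun i _ => by rw [show p + 1 + i = p + (i + 1) from by omega])]
      rw [List.length_cons, Finset.sum_range_succ']
      simp only [List.getD_cons_succ, List.getD_cons_zero, Nat.add_zero]
      ring
    · rw [List.length_cons]
      push_cast
      ring

-- the indexed weighted sum collapses to the box-end indices m-1, 2m-1, …
lemma pv_sum_eq (mN : Nat) (hm : 1 ≤ mN) (t : List Int) (n : Nat) :
    (∑ i ∈ Finset.range n,
        t.getD i 0 * ((((i + 1) / mN : Nat) : Int) - (((i / mN : Nat)) : Int)))
      = ∑ j ∈ Finset.range (n / mN), t.getD (mN - 1 + mN * j) 0 := by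
  induction n with
  | zero => simp [Nat.zero_div]
  | succ n ih =>
    rw [Finset.sum_range_succ, ih]
    by_cases hdvd : mN ∣ (n + 1)
    · have hsucc : (n + 1) / mN = n / mN + 1 := by
        rw [Nat.succ_div, if_pos hdvd]
      have hmul : (n + 1) / mN * mN = n + 1 := Nat.div_mul_cancel hdvd
      have hidx : mN - 1 + mN * (n / mN) = n := by
        have h2 : mN * (n / mN) + mN = n + 1 := by
          calc mN * (n / mN) + mN = (n / mN + 1) * mN := by ring
          _ = (n + 1) / mN * mN := by rw [hsucc]
          _ = n + 1 := hmul
        omega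
      rw [hsucc, Finset.sum_range_succ, hidx]
      push_cast [hsucc]
      ring
    · have hsucc : (n + 1) / mN = n / mN := by
        rw [Nat.succ_div, if_neg hdvd]
        omega
      rw [hsucc]
      simp

lemma pv_B_eq (k : Int) (mN : Nat) (hm : 1 ≤ mN) (score : List Int) :
    solution_alt k ((mN : Nat) : Int) score
      = (∑ i ∈ Finset.range score.length,
          (PySem.List.sorted score (fun x => x) true).getD i 0
            * ((((i + 1) / mN : Nat) : Int) - (((i / mN : Nat)) : Int))) * ((mN : Nat) : Int) := by
  simp only [solution_alt]
  rw [PySem.Dict.foldl_insert_getD_add_one_eq_counter]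
  simp only [PySem.Dict.keys_counter, PySem.Dict.getD_counter]
  rw [pv_fold_runs ((mN : Nat) : Int) (fun v => score.count v)
      (PySem.List.sorted (PySem.Set.ofList score) (fun x => x) true) 0 0]
  rw [← pv_runs score]
  have h := pv_fold_elt mN (PySem.List.sorted score (fun x => x) true) 0 0
  simp only [Nat.cast_zero] at h
  rw [h]
  have hlen : (PySem.List.sorted score (fun x => x) true).length = score.length := by simp
  simp only [hlen, Nat.zero_add, zero_add]

-- ===== VERDICT (by name: the statement is the Claim_ definition above) =====
theorem solution_spec : Claim_equal_solution := by
  intro k m score _ hpre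
  unfold Pre_solution at hpre
  unfold Spec_solution
  obtain ⟨mN, rfl⟩ : ∃ mN : Nat, m = (mN : Int) := ⟨m.toNat, by omega⟩
  have hm : 1 ≤ mN := by exact_mod_cast hpre
  rw [pv_A_eq k mN hm score, pv_B_eq k mN hm score,
    pv_sum_eq mN hm (PySem.List.sorted score (fun x => x) true) score.length]
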